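-- pv_equiv track=rewrite | github.com/MohammedFarzin/Leet-Code | 1337. The K weakest rows in a matrix.py | k_weakest_row
-- ===== SOURCE A (Python) =====
-- def k_weakest_row(mat, k):
--     count = 0
--     row_c = {}
--
--     for i in range(len(mat)):
--         count = 0
--         for j in range(len(mat[i])):
--             if mat[i][j] == 1:
--                 count += 1
--         row_c[i] = count
--     row_c = [k for k, v in sorted(row_c.items(), key=lambda item: item[1])]
--     return row_c[:k]
-- ===== SOURCE B (Python) =====
-- def k_weakest_row(mat, k):
--     # Counting sort over one-counts instead of a comparison sort of a dict.
--     maxlen = 0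
--     for row in mat:
--         if len(row) > maxlen:
--             maxlen = len(row)
--     buckets = [[] for _ in range(maxlen + 1)]
--     for i, row in enumerate(mat):
--         buckets[row.count(1)].append(i)
--     order = [i for b in buckets for i in b]
--     return order[:k]
-- ===== Notes on version B (the rewrite author's own statement) =====
-- stated objective: alternative
-- what changed: Replaces the dict of per-row counts plus a comparison sort with a counting sort: row indices are appended into buckets indexed by their one-count and the buckets are concatenated in ascending count order before slicing [:k].
import Mathlib
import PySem

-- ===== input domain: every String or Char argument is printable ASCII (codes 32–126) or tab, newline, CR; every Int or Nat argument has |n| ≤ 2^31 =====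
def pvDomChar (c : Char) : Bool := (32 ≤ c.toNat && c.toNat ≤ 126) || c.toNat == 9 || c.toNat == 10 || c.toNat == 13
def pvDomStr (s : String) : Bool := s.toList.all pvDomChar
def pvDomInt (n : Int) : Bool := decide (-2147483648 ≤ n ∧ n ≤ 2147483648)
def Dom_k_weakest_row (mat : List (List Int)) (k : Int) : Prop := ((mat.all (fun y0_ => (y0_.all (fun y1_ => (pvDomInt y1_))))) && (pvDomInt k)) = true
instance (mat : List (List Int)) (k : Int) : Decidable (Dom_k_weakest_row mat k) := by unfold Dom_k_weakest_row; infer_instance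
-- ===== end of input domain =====

-- B replaces A's dict-of-counts + comparison sort by a counting sort over one-count buckets (alternative decomposition, same results).

-- ===== PORT A =====
def k_weakest_row (mat : List (List Int)) (k : Int) : List Int :=
  -- count = 0; row_c = {}; for i in range(len(mat)): …
  let row_c : PySem.Dict Int Int :=
    (PySem.List.pyRange 0 (PySem.List.len mat)).foldl (fun d i =>
      let row := PySem.List.pyGetD mat i []
      -- count = 0; for j in range(len(mat[i])): if mat[i][j] == 1: count += 1
      let count : Int := (PySem.List.pyRange 0 (PySem.List.len row)).foldl
        (fun c j => if PySem.List.pyGetD row j 0 == 1 then c + 1 else c) 0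
      d.insert i count) PySem.Dict.empty
  -- row_c = [k for k, v in sorted(row_c.items(), key=lambda item: item[1])]
  let row_c2 := (PySem.List.sorted row_c.items (fun item => item.2)).map (fun p => p.1)
  PySem.List.slice row_c2 none (some k)

-- ===== PORT B =====
def k_weakest_row_alt (mat : List (List Int)) (k : Int) : List Int :=
  -- maxlen = 0; for row in mat: if len(row) > maxlen: maxlen = len(row)
  let maxlen : Nat := mat.foldl (fun m row => if row.length > m then row.length else m) 0
  -- buckets = [[] for _ in range(maxlen + 1)]; for i, row in enumerate(mat): buckets[row.count(1)].append(i)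
  let buckets : List (List Int) :=
    (PySem.List.enumerate mat).foldl (fun bs p =>
      let c := PySem.List.count p.2 1
      bs.set c (bs.getD c [] ++ [p.1]))
      (List.replicate (maxlen + 1) [])
  -- order = [i for b in buckets for i in b]; return order[:k]
  PySem.List.slice buckets.flatten none (some k)

-- ===== PRECONDITION & SPEC =====
def Spec_k_weakest_row (mat : List (List Int)) (k : Int) (out : List Int) : Prop := out = k_weakest_row_alt mat k
instance (mat : List (List Int)) (k : Int) (out : List Int) : Decidable (Spec_k_weakest_row mat k out) := by unfold Spec_k_weakest_row; infer_instance

-- ===== CLAIM (what is proved, stated in full; the proofs are below) =====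
def Claim_equal_k_weakest_row : Prop := ∀ (mat : List (List Int)) (k : Int), Dom_k_weakest_row mat k → Spec_k_weakest_row mat k (k_weakest_row mat k)

-- ===== LEMMAS AND PROOFS =====


theorem cntA_eq_count (row : List Int) :
    (PySem.List.pyRange 0 (PySem.List.len row)).foldl
      (fun c j => if PySem.List.pyGetD row j 0 == 1 then c + 1 else c) 0
    = ((PySem.List.count row 1 : Nat) : Int) := by
  simp only [PySem.List.len_eq]
  rw [PySem.List.foldl_pyRange_zero_pyGetD' row 0 (fun c x => if x == 1 then c + 1 else c) 0]
  rw [PySem.List.count_eq]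
  suffices h : ∀ (c : Int), row.foldl (fun c x => if x == 1 then c + 1 else c) c = c + List.count 1 row by
    simpa using h 0
  induction row with
  | nil => simp
  | cons y ys ih =>
    intro c
    simp only [List.foldl_cons]
    by_cases hy : y = 1
    · rw [if_pos (by simp [hy]), ih, List.count_cons]
      simp [hy]
      ring
    · rw [if_neg (by simp [hy]), ih, List.count_cons]
      simp [hy]

theorem getD_map_nil {α β : Type} (f : α → β) (l : List (List α)) (c : Nat) :
    (l.map (fun ys => ys.map f)).getD c [] = (l.getD c []).map f := by
  simp [List.getD_eq_getElem?_getD, List.getElem?_map]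
  cases l[c]? <;> simp

theorem le_foldl_max (mat : List (List Int)) (a : Nat) :
    a ≤ mat.foldl (fun m row => if row.length > m then row.length else m) a := by
  induction mat generalizing a with
  | nil => simp
  | cons r rs ih =>
    simp only [List.foldl_cons]
    split_ifs with h
    · exact le_trans (le_of_lt h) (ih _)
    · exact ih a

theorem mem_le_foldl_max (mat : List (List Int)) (row : List Int) (h : row ∈ mat) (a : Nat) :
    row.length ≤ mat.foldl (fun m r => if r.length > m then r.length else m) a := by
  induction mat generalizing a with
  | nil => simp at h
  | cons r rs ih =>
    simp only [List.foldl_cons]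
    rcases List.mem_cons.mp h with rfl | hm
    · split_ifs with hgt
      · exact le_foldl_max rs _
      · exact le_trans (Nat.le_of_not_lt hgt) (le_foldl_max rs a)
    · exact ih hm _

theorem insertBy_append_left {α : Type} (before : α → α → Bool) (x : α) (ys zs : List α)
    (h : ∀ y ∈ ys, before x y = false) :
    PySem.List.insertBy before x (ys ++ zs) = ys ++ PySem.List.insertBy before x zs := by
  induction ys with
  | nil => simp
  | cons y ys ih =>
    have hy : before x y = false := h y (by simp)
    simp [PySem.List.insertBy, hy, ih (fun y hy => h y (by simp [hy]))]

theorem insertBy_forall_before {α : Type} (before : α → α → Bool) (x : α) (zs : List α)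
    (h : ∀ z ∈ zs, before x z = true) :
    PySem.List.insertBy before x zs = x :: zs := by
  cases zs with
  | nil => simp [PySem.List.insertBy]
  | cons z zs => simp [PySem.List.insertBy, h z (by simp)]

theorem ins_flatten (PB : List (List (Int × Int))) (t : Int) (c : Nat) (x : Int × Int)
    (hc : c < PB.length) (hx : x.2 = t + c)
    (hw : ∀ j : Nat, j < PB.length → ∀ p ∈ PB.getD j [], p.2 = t + j) :
    PySem.List.insertBy (fun a b => decide (a.2 < b.2)) x PB.flatten
      = (PB.set c (PB.getD c [] ++ [x])).flatten := by
  induction PB generalizing t c with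
  | nil => simp at hc
  | cons b rest ih =>
    have hflat : ∀ p ∈ rest.flatten, ∃ j : Nat, j < rest.length ∧ p.2 = (t + 1) + j := by
      intro p hp
      rcases List.mem_flatten.mp hp with ⟨l, hl, hpl⟩
      rcases List.getElem_of_mem hl with ⟨j, hj, rfl⟩
      refine ⟨j, hj, ?_⟩
      have := hw (j + 1) (by simpa using Nat.succ_lt_succ hj) p
        (by simpa [List.getD_eq_getElem?_getD, List.getElem?_cons_succ, List.getElem?_eq_getElem hj] using hpl)
      push_cast at this ⊢
      linarith
    cases c with
    | zero =>
      have hb : ∀ y ∈ b, (decide (x.2 < y.2) : Bool) = false := by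
        intro y hy
        have := hw 0 (by simp) y (by simpa using hy)
        simp [hx, this]
      have hz : ∀ z ∈ rest.flatten, (decide (x.2 < z.2) : Bool) = true := by
        intro z hz
        rcases hflat z hz with ⟨j, hj, hzj⟩
        simp only [hx, hzj]
        simp
        linarith
      simp only [List.flatten_cons]
      rw [insertBy_append_left _ _ _ _ hb, insertBy_forall_before _ _ _ hz]
      simp
    | succ c' =>
      have hb : ∀ y ∈ b, (decide (x.2 < y.2) : Bool) = false := by
        intro y hy
        have := hw 0 (by simp) y (by simpa using hy)
        simp only [hx, this]
        simp
        linarith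
      simp only [List.flatten_cons]
      rw [insertBy_append_left _ _ _ _ hb]
      rw [ih (t + 1) c' (by simpa using Nat.lt_of_succ_lt_succ hc)
        (by push_cast at hx ⊢; linarith)
        (by
          intro j hj p hp
          have := hw (j + 1) (by simpa using Nat.succ_lt_succ hj) p
            (by simpa [List.getD_eq_getElem?_getD, List.getElem?_cons_succ] using hp)
          push_cast at this ⊢
          linarith)]
      simp [List.getD_eq_getElem?_getD]

theorem csort (L : List (Int × Int)) (PB : List (List (Int × Int)))
    (hw : ∀ j : Nat, j < PB.length → ∀ p ∈ PB.getD j [], p.2 = (j : Int))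
    (hL : ∀ p ∈ L, p.2.toNat < PB.length ∧ p.2 = (p.2.toNat : Int)) :
    L.foldl (fun acc x => PySem.List.insertBy (fun a b => decide (a.2 < b.2)) x acc) PB.flatten
      = (L.foldl (fun bs x => bs.set x.2.toNat (bs.getD x.2.toNat [] ++ [x])) PB).flatten := by
  induction L generalizing PB with
  | nil => simp
  | cons x L ih =>
    simp only [List.foldl_cons]
    have hx := hL x (by simp)
    rw [ins_flatten PB 0 x.2.toNat x hx.1 (by simpa using hx.2)
      (by intro j hj p hp; simpa using hw j hj p hp)]
    rw [ih _ ?_ ?_]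
    · intro j hj p hp
      rw [List.length_set] at hj
      by_cases hjc : j = x.2.toNat
      · subst hjc
        rw [List.getD_eq_getElem?_getD, List.getElem?_set_self (by omega)] at hp
        simp at hp
        rcases hp with h1 | h2
        · exact hw _ hj p (by simp [List.getD_eq_getElem?_getD]; exact h1)
        · subst h2; simpa using hx.2
      · rw [List.getD_eq_getElem?_getD, List.getElem?_set_ne (by omega)] at hp
        exact hw _ hj p (by simpa [List.getD_eq_getElem?_getD] using hp)
    · intro p hp
      have := hL p (by simp [hp])
      simpa using this

theorem mapfst_fold (M : List (Int × List Int)) (PB : List (List (Int × Int))) :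
    M.foldl (fun bs p =>
        let c := PySem.List.count p.2 1
        bs.set c (bs.getD c [] ++ [p.1])) (PB.map (fun ys => ys.map Prod.fst))
      = (M.foldl (fun bs p =>
          let c := PySem.List.count p.2 1
          bs.set c (bs.getD c [] ++ [(p.1, (c : Int))])) PB).map (fun ys => ys.map Prod.fst) := by
  induction M generalizing PB with
  | nil => simp
  | cons p M ih =>
    simp only [List.foldl_cons]
    rw [← ih]
    congr 1
    rw [List.map_set, getD_map_nil]
    simp

theorem kwr_core (mat : List (List Int)) (k : Int) :
    k_weakest_row mat k = k_weakest_row_alt mat k := by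
  unfold k_weakest_row k_weakest_row_alt
  set maxlen : Nat := mat.foldl (fun m row => if row.length > m then row.length else m) 0 with hmax
  -- A's dict items
  have hitems :
      ((PySem.List.pyRange 0 (PySem.List.len mat)).foldl (fun d i =>
        let row := PySem.List.pyGetD mat i []
        let count : Int := (PySem.List.pyRange 0 (PySem.List.len row)).foldl
          (fun c j => if PySem.List.pyGetD row j 0 == 1 then c + 1 else c) 0
        d.insert i count) PySem.Dict.empty).items
      = (PySem.List.pyRange 0 (PySem.List.len mat)).map
          (fun i => (i, ((PySem.List.count (PySem.List.pyGetD mat i []) 1 : Nat) : Int))) := by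
    have := PySem.Dict.items_foldl_insert_fresh (PySem.List.pyRange 0 (PySem.List.len mat))
      (fun i => i)
      (fun i => ((PySem.List.count (PySem.List.pyGetD mat i []) 1 : Nat) : Int))
      PySem.Dict.empty
      (by intro a _; simp)
      (by simp only [List.map_id']; simp [PySem.List.len_eq]; exact PySem.List.nodup_pyRange_one 0 _)
    simp only [cntA_eq_count]
    simpa using this
  -- common pair list
  have hL' : (PySem.List.enumerate mat).map
        (fun p => (p.1, ((PySem.List.count p.2 1 : Nat) : Int)))
      = (PySem.List.pyRange 0 (PySem.List.len mat)).map
          (fun i => (i, ((PySem.List.count (PySem.List.pyGetD mat i []) 1 : Nat) : Int))) := by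
    rw [PySem.List.enumerate_eq_map_pyRange mat []]
    simp [List.map_map]
  have hwf : ∀ j : Nat, j < (List.replicate (maxlen + 1) ([] : List (Int × Int))).length →
      ∀ p ∈ (List.replicate (maxlen + 1) ([] : List (Int × Int))).getD j [], p.2 = (j : Int) := by
    intro j hj p hp
    rw [List.getD_eq_getElem?_getD, List.getElem?_replicate] at hp
    split at hp <;> simp at hp
  have hLmem : ∀ p ∈ (PySem.List.enumerate mat).map
      (fun p => (p.1, ((PySem.List.count p.2 1 : Nat) : Int))),
      p.2.toNat < (List.replicate (maxlen + 1) ([] : List (Int × Int))).length ∧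
        p.2 = ((p.2.toNat : Nat) : Int) := by
    intro p hp
    rcases List.mem_map.mp hp with ⟨q, hq, rfl⟩
    rcases (PySem.List.mem_enumerate_iff mat 0 q).mp hq with ⟨i, hi, rfl⟩
    simp only [Int.toNat_natCast, List.length_replicate]
    refine ⟨?_, trivial⟩
    have h1 : PySem.List.count mat[i] 1 ≤ mat[i].length := by
      rw [PySem.List.count_eq]; exact List.count_le_length
    have h2 := mem_le_foldl_max mat mat[i] (List.getElem_mem hi) 0
    omega
  have hcs := csort ((PySem.List.enumerate mat).map
      (fun p => (p.1, ((PySem.List.count p.2 1 : Nat) : Int))))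
      (List.replicate (maxlen + 1) ([] : List (Int × Int))) hwf hLmem
  rw [show (List.replicate (maxlen + 1) ([] : List (Int × Int))).flatten = [] by simp] at hcs
  rw [List.foldl_map] at hcs
  -- core list equality
  have hcore : (PySem.List.sorted ((PySem.List.pyRange 0 (PySem.List.len mat)).map
        (fun i => (i, ((PySem.List.count (PySem.List.pyGetD mat i []) 1 : Nat) : Int))))
        (fun item => item.2)).map (fun p => p.1)
      = ((PySem.List.enumerate mat).foldl (fun bs p =>
          let c := PySem.List.count p.2 1
          bs.set c (bs.getD c [] ++ [p.1]))
          (List.replicate (maxlen + 1) [])).flatten := by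
    rw [← hL', PySem.List.sorted_eq_foldl_insertBy, List.foldl_map, hcs]
    rw [show (List.replicate (maxlen + 1) ([] : List Int))
        = (List.replicate (maxlen + 1) ([] : List (Int × Int))).map (fun ys => ys.map Prod.fst) by
      simp]
    rw [mapfst_fold]
    simp only [List.foldl_map, Int.toNat_natCast]
    simp [List.map_flatten]
  show PySem.List.slice ((PySem.List.sorted
      ((PySem.List.pyRange 0 (PySem.List.len mat)).foldl (fun d i =>
        let row := PySem.List.pyGetD mat i []
        let count : Int := (PySem.List.pyRange 0 (PySem.List.len row)).foldl
          (fun c j => if PySem.List.pyGetD row j 0 == 1 then c + 1 else c) 0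
        d.insert i count) PySem.Dict.empty).items
      (fun item => item.2)).map (fun p => p.1)) none (some k)
    = PySem.List.slice ((PySem.List.enumerate mat).foldl (fun bs p =>
        let c := PySem.List.count p.2 1
        bs.set c (bs.getD c [] ++ [p.1]))
        (List.replicate (maxlen + 1) [])).flatten none (some k)
  rw [hitems, hcore]

-- ===== VERDICT (by name: the statement is the Claim_ definition above) =====
theorem k_weakest_row_spec : Claim_equal_k_weakest_row := by
  intro mat k _
  unfold Spec_k_weakest_row
  exact kwr_core mat k
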